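-- pv_equiv track=rewrite | github.com/Zaaees/Citadelle-2.0 | cogs/Cards.py | compute_total_medals
-- ===== SOURCE A (Python) =====
-- def compute_total_medals(user_id: int, students: dict, user_character_names: set) -> int:
--     owned_chars = []
--     for char_name in user_character_names:
--         if char_name in students and students[char_name].get("user_id") != user_id:
--             students[char_name]["user_id"] = user_id
--     for data in students.values():
--         if data.get("user_id") == user_id:
--             owned_chars.append(data)
--     if owned_chars:
--         most_medals = max(char.get("medals", 0) for char in owned_chars)
--         bonus_draws = (len(owned_chars) - 1) * 5
--         return most_medals + bonus_draws
--     return 0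
-- ===== SOURCE B (Python) =====
-- def compute_total_medals(user_id: int, students: dict, user_character_names: set) -> int:
--     # Pure one-pass version: a character ends up owned by user_id exactly when its
--     # name is in user_character_names or it already belonged to user_id, so the
--     # result can be read off the original dict without performing A's in-place
--     # mutation (this function does NOT mutate students; return value only).
--     owned = [data.get("medals", 0) for name, data in students.items()
--              if name in user_character_names or data.get("user_id") == user_id]
--     return max(owned) + 5 * (len(owned) - 1) if owned else 0
-- ===== Notes on version B (the rewrite author's own statement) =====
-- stated objective: simpler
-- what changed: B drops A's mutate-then-rescan scheme (first loop writes user_id into the dict, second loop re-reads it): ownership is decided directly by the disjunction 'name in user_character_names or original user_id == user_id', so one comprehension over the untouched dict replaces both loops; B does not mutate students (return-value equivalence).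
import Mathlib
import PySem

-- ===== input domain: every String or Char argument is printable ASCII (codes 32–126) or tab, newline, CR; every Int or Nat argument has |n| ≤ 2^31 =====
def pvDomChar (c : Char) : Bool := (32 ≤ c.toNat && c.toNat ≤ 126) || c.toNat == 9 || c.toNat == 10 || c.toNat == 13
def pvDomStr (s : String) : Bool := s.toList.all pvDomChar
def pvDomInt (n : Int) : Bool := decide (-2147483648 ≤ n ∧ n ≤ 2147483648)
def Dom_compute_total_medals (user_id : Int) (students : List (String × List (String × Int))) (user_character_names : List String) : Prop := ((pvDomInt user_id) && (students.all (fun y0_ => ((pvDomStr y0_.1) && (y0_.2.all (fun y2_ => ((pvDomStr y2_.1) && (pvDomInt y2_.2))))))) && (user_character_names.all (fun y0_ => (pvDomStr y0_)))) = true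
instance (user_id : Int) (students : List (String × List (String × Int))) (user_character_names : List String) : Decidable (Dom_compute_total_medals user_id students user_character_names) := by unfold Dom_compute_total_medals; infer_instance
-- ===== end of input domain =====

-- B replaces A's mutate-then-rescan scheme (first loop writes user_id into the dict, second
-- loop re-reads it) by one pure pass over the original dict deciding ownership with the
-- disjunction "name in user_character_names or original user_id == user_id" (simpler;
-- unlike A, B does not mutate `students`: the equivalence proved is about the return value).


-- ===== PORT A =====
-- first loop of A: claim each named character whose user_id differs (in-place dict update)
def pvClaimStepA (user_id : Int) (st : List (String × List (String × Int))) (char_name : String) : List (String × List (String × Int)) :=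
  match (PySem.Dict.mk st).get? char_name with
  | some d =>
      if (PySem.Dict.mk d).get? "user_id" ≠ some user_id then
        ((PySem.Dict.mk st).insert char_name ((PySem.Dict.mk d).insert "user_id" user_id).items).items
      else st
  | none => st

def compute_total_medals (user_id : Int) (students : List (String × List (String × Int))) (user_character_names : List String) : Int :=
  let st := user_character_names.foldl (pvClaimStepA user_id) students
  let owned_chars := st.foldl (fun acc p =>
      if (PySem.Dict.mk p.2).get? "user_id" = some user_id then acc ++ [p.2] else acc) []
  if owned_chars.isEmpty then 0
  else
    let most_medals := (PySem.List.max? (owned_chars.map (fun d => (PySem.Dict.mk d).getD "medals" 0)) (fun x => x)).getD 0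
    let bonus_draws := ((owned_chars.length : Int) - 1) * 5
    most_medals + bonus_draws

-- ===== PORT B =====
def compute_total_medals_alt (user_id : Int) (students : List (String × List (String × Int))) (user_character_names : List String) : Int :=
  let owned := (students.filter (fun p =>
      user_character_names.contains p.1 || (PySem.Dict.mk p.2).get? "user_id" == some user_id)).map
      (fun p => (PySem.Dict.mk p.2).getD "medals" 0)
  if owned.isEmpty then 0
  else (PySem.List.max? owned (fun x => x)).getD 0 + 5 * ((owned.length : Int) - 1)

-- ===== PRECONDITION & SPEC =====
-- Pre_ excludes only association lists whose outer keys are not pairwise distinct: those are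
-- not representable as a Python dict at all, so no input the Python A accepts is excluded.
def Pre_compute_total_medals (user_id : Int) (students : List (String × List (String × Int))) (user_character_names : List String) : Prop :=
  (students.map Prod.fst).Nodup
instance (user_id : Int) (students : List (String × List (String × Int))) (user_character_names : List String) : Decidable (Pre_compute_total_medals user_id students user_character_names) := by unfold Pre_compute_total_medals; infer_instance

def pvWitness_compute_total_medals : Int × (List (String × List (String × Int))) × List String :=
  (1, [("a", [("user_id", 2), ("medals", 3)]), ("b", [("user_id", 1)])], ["a"])

def Spec_compute_total_medals (user_id : Int) (students : List (String × List (String × Int))) (user_character_names : List String) (out : Int) : Prop := out = compute_total_medals_alt user_id students user_character_names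
instance (user_id : Int) (students : List (String × List (String × Int))) (user_character_names : List String) (out : Int) : Decidable (Spec_compute_total_medals user_id students user_character_names out) := by unfold Spec_compute_total_medals; infer_instance

-- ===== CLAIM (what is proved, stated in full; the proofs are below) =====
def Claim_equal_compute_total_medals : Prop := ∀ (user_id : Int) (students : List (String × List (String × Int))) (user_character_names : List String), Dom_compute_total_medals user_id students user_character_names → Pre_compute_total_medals user_id students user_character_names → Spec_compute_total_medals user_id students user_character_names (compute_total_medals user_id students user_character_names)

-- ===== LEMMAS AND PROOFS =====

-- the pointwise effect of A's whole first loop on one dict entry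
def pvUpd (uid : Int) (ns : List String) (p : String × List (String × Int)) : String × List (String × Int) :=
  if p.1 ∈ ns ∧ (PySem.Dict.mk p.2).get? "user_id" ≠ some uid then
    (p.1, ((PySem.Dict.mk p.2).insert "user_id" uid).items)
  else p

-- structure eta for Dict: rebuilding a Dict from its items is the identity
theorem pvMkItems {κ ν : Type} [BEq κ] (d : PySem.Dict κ ν) : PySem.Dict.mk d.items = d := rfl

theorem pvUpd_fst (uid : Int) (ns : List String) (p : String × List (String × Int)) :
    (pvUpd uid ns p).1 = p.1 := by
  unfold pvUpd; split <;> rfl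

theorem pvUpd_comp (uid : Int) (n : String) (ns : List String) (p : String × List (String × Int)) :
    pvUpd uid ns (pvUpd uid [n] p) = pvUpd uid (n :: ns) p := by
  by_cases h1 : p.1 = n
  · by_cases h2 : (PySem.Dict.mk p.2).get? "user_id" = some uid
    · simp [pvUpd, h1, h2]
    · simp [pvUpd, h1, h2, pvMkItems, PySem.Dict.get?_insert_self]
  · by_cases hm : p.1 ∈ ns <;> simp [pvUpd, h1, hm]

-- one step of A's first loop is a pointwise map, given distinct outer keys
theorem pvClaimStepA_eq_map (uid : Int) (n : String) (st : List (String × List (String × Int)))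
    (hnd : (st.map Prod.fst).Nodup) :
    pvClaimStepA uid st n = st.map (pvUpd uid [n]) := by
  have hknd : (PySem.Dict.mk st).keys.Nodup := hnd
  have hget : ∀ p ∈ st, (PySem.Dict.mk st).get? p.1 = some p.2 := by
    intro p hp
    exact PySem.Dict.get?_of_mem_items (PySem.Dict.mk st) (by simpa using hp) hknd
  unfold pvClaimStepA
  cases hg : (PySem.Dict.mk st).get? n with
  | none =>
      symm
      refine (List.map_congr_left ?_).trans (List.map_id st)
      intro p hp
      have hne : p.1 ≠ n := by
        intro h
        have h2 := hget p hp; rw [h, hg] at h2; cases h2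
      simp [pvUpd, hne]
  | some d =>
      by_cases hui : (PySem.Dict.mk d).get? "user_id" = some uid
      · simp only [hui, ne_eq, not_true_eq_false, if_false]
        symm
        refine (List.map_congr_left ?_).trans (List.map_id st)
        intro p hp
        by_cases h1 : p.1 = n
        · have hpd : p.2 = d := by
            have h2 := hget p hp; rw [h1, hg] at h2; exact (Option.some.inj h2).symm
          simp [pvUpd, h1, hpd, hui]
        · simp [pvUpd, h1]
      · simp only [hui, ne_eq, not_false_eq_true, if_true]
        have hcon : (PySem.Dict.mk st).contains n = true := by
          rw [PySem.Dict.contains_eq_isSome_get?, hg]; rfl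
        rw [PySem.Dict.items_insert_of_contains _ _ hcon]
        refine List.map_congr_left ?_
        intro p hp
        by_cases h1 : p.1 = n
        · have hpd : p.2 = d := by
            have h2 := hget p hp; rw [h1, hg] at h2; exact (Option.some.inj h2).symm
          simp [pvUpd, h1, hpd, hui]
        · simp [pvUpd, h1]

-- A's whole first loop is one pointwise map over the original dict
theorem pvFoldClaim_eq_map (uid : Int) :
    ∀ (ns : List String) (st : List (String × List (String × Int))),
      (st.map Prod.fst).Nodup →
      ns.foldl (pvClaimStepA uid) st = st.map (pvUpd uid ns) := by
  intro ns
  induction ns with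
  | nil =>
      intro st _
      symm
      refine (List.map_congr_left ?_).trans (List.map_id st)
      intro p _; simp [pvUpd]
  | cons n ns ih =>
      intro st hnd
      have hk : (st.map (pvUpd uid [n])).map Prod.fst = st.map Prod.fst := by
        rw [List.map_map]
        exact List.map_congr_left (fun p _ => pvUpd_fst uid [n] p)
      have hrest := ih (st.map (pvUpd uid [n])) (by rw [hk]; exact hnd)
      rw [List.foldl_cons, pvClaimStepA_eq_map uid n st hnd, hrest, List.map_map]
      exact List.map_congr_left (fun p _ => pvUpd_comp uid n ns p)

-- A's append-loop builds exactly the matching rows (mapped projection of a filter)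
theorem pv_owned_eq (uid : Int) :
    ∀ (l : List (String × List (String × Int))) (acc : List (List (String × Int))),
      l.foldl (fun acc p => if (PySem.Dict.mk p.2).get? "user_id" = some uid then acc ++ [p.2] else acc) acc
        = acc ++ ((l.filter (fun p => decide ((PySem.Dict.mk p.2).get? "user_id" = some uid))).map Prod.snd) := by
  intro l
  induction l with
  | nil => simp
  | cons h t ih =>
      intro acc
      by_cases hc : (PySem.Dict.mk h.2).get? "user_id" = some uid <;>
        simp [List.foldl, hc, ih]

-- after the loop, an entry matches uid exactly when B's ownership disjunction holds
theorem pvUpd_pred (uid : Int) (ns : List String) (p : String × List (String × Int)) :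
    decide ((PySem.Dict.mk (pvUpd uid ns p).2).get? "user_id" = some uid)
      = (ns.contains p.1 || (PySem.Dict.mk p.2).get? "user_id" == some uid) := by
  by_cases hm : p.1 ∈ ns
  · by_cases hui : (PySem.Dict.mk p.2).get? "user_id" = some uid <;>
      simp [pvUpd, hm, hui, pvMkItems, PySem.Dict.get?_insert_self]
  · simp [pvUpd, hm]
    by_cases hui : (PySem.Dict.mk p.2).get? "user_id" = some uid <;> simp [hui]

-- the loop never touches the "medals" entry
theorem pvUpd_medals (uid : Int) (ns : List String) (p : String × List (String × Int)) :
    (PySem.Dict.mk (pvUpd uid ns p).2).getD "medals" 0 = (PySem.Dict.mk p.2).getD "medals" 0 := by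
  unfold pvUpd
  split
  · rw [pvMkItems]
    exact PySem.Dict.getD_insert_of_ne _ _ _ (by decide)
  · rfl

theorem compute_total_medals_eq_alt (user_id : Int) (students : List (String × List (String × Int))) (user_character_names : List String)
    (hnd : (students.map Prod.fst).Nodup) :
    compute_total_medals user_id students user_character_names
      = compute_total_medals_alt user_id students user_character_names := by
  simp only [compute_total_medals, compute_total_medals_alt]
  rw [pvFoldClaim_eq_map user_id user_character_names students hnd,
      pv_owned_eq user_id _ [], List.nil_append, List.filter_map, List.map_map, List.map_map]
  have hpred : ((fun p : String × List (String × Int) => decide ((PySem.Dict.mk p.2).get? "user_id" = some user_id)) ∘ pvUpd user_id user_character_names)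
      = fun p => user_character_names.contains p.1 || (PySem.Dict.mk p.2).get? "user_id" == some user_id := by
    funext p; exact pvUpd_pred user_id user_character_names p
  rw [hpred]
  have hmed : ((fun d => (PySem.Dict.mk d).getD "medals" 0) ∘ Prod.snd ∘ pvUpd user_id user_character_names)
      = fun p : String × List (String × Int) => (PySem.Dict.mk p.2).getD "medals" 0 := by
    funext p; exact pvUpd_medals user_id user_character_names p
  rw [hmed]
  simp only [List.isEmpty_map, List.length_map]
  split_ifs with h
  · rfl
  · ring

-- ===== VERDICT (by name: the statement is the Claim_ definition above) =====
theorem compute_total_medals_spec : Claim_equal_compute_total_medals := by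
  intro uid st names _ hpre
  unfold Spec_compute_total_medals
  exact compute_total_medals_eq_alt uid st names hpre
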